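-- pv_equiv track=rewrite | github.com/suriya4code/dsa_algo | Hashmaps/distinct_elements_in_k_window.py | solve
-- ===== SOURCE A (Python) =====
-- def solve(A,B):
--     n = len(A)
--     sum_of = 0
--     for i in range(n-B+1):
--         s= i
--         e = i+B
--         ds = set(A[s:e])
--         sum_of += len(ds)
--     return sum_of
-- ===== SOURCE B (Python) =====
-- def solve(A, B):
--     # Sliding window: one pass with a count map and an incrementally maintained
--     # distinct counter, instead of rebuilding a set for every window.
--     n = len(A)
--     if B <= 0 or B > n:
--         return 0
--     cnt = {}
--     distinct = 0
--     total = 0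
--     for i, x in enumerate(A):
--         c = cnt.get(x, 0)
--         if c == 0:
--             distinct += 1
--         cnt[x] = c + 1
--         if i >= B:
--             y = A[i - B]
--             cy = cnt[y] - 1
--             cnt[y] = cy
--             if cy == 0:
--                 distinct -= 1
--         if i >= B - 1:
--             total += distinct
--     return total
-- ===== Notes on version B (the rewrite author's own statement) =====
-- stated objective: faster
-- what changed: Replaces the per-window set() rebuild with a single sliding-window pass that maintains a count map and an incrementally updated distinct counter.
-- intended difference: For B < 0 with len(A) >= 1 - B, A's slice A[i:i+B] wraps the negative end bound and sums distinct counts of spurious wrapped windows (always returning >= 1), while B returns 0, the intended sum over the zero existing windows of negative size. — e.g. on solve([1, 1], -1): A returns 1, B returns 0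
import Mathlib
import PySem

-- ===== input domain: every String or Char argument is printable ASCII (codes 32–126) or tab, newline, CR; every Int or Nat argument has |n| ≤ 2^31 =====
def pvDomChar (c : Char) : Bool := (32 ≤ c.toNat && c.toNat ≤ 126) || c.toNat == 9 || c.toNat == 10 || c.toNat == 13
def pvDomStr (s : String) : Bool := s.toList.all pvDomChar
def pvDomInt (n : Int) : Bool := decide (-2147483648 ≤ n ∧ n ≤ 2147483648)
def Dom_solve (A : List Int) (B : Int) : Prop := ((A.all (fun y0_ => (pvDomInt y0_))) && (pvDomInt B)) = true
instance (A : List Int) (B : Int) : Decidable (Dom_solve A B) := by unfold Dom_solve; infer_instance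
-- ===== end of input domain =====

-- B replaces the per-window set rebuild (O(n·B)) by one sliding-window pass with a count map
-- and an incrementally maintained distinct counter (O(n)); for B < 0, where A's negative slice
-- bound wraps around, B returns the intended 0 (see D_solve below).

-- B replaces the per-window set rebuild by one sliding-window pass with a count map and an
-- incrementally maintained distinct counter; for B < 0, where A's negative slice bound wraps
-- around, B returns the intended 0 (see D_solve below).

-- ===== PORT A =====
def solve (A : List Int) (B : Int) : Int :=
  let n : Int := A.length
  (PySem.List.pyRange 0 (n - B + 1) 1).foldl
    (fun sum_of i =>
      let s := i
      let e := i + B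
      let ds := PySem.Set.ofList (PySem.List.slice A (some s) (some e))
      sum_of + PySem.Set.len ds) 0

-- ===== PORT B =====
-- loop body of Source B's single pass: state is (cnt, distinct, total), p is one (i, x) of enumerate(A)
def solveAltStep (A : List Int) (B : Int)
    (st : PySem.Dict Int Int × Int × Int) (p : Int × Int) :
    PySem.Dict Int Int × Int × Int :=
  let cnt := st.1
  let distinct := st.2.1
  let total := st.2.2
  let i := p.1
  let x := p.2
  let c := cnt.getD x 0
  let distinct := if c = 0 then distinct + 1 else distinct
  let cnt := cnt.insert x (c + 1)
  let st2 :=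
    if B ≤ i then
      -- A[i - B]: under the guard 1 ≤ B ≤ i < len(A), so the index is always in range
      -- and the `.getD 0` default is never taken (exact).
      let y := (PySem.List.pyGet? A (i - B)).getD 0
      let cy := cnt.getD y 0 - 1
      (cnt.insert y cy, if cy = 0 then distinct - 1 else distinct)
    else (cnt, distinct)
  let total := if B - 1 ≤ i then total + st2.2 else total
  (st2.1, st2.2, total)

def solve_alt (A : List Int) (B : Int) : Int :=
  let n : Int := A.length
  if B ≤ 0 ∨ n < B then 0
  else
    ((PySem.List.enumerate A 0).foldl (solveAltStep A B) (PySem.Dict.empty, 0, 0)).2.2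

-- ===== PRECONDITION & SPEC =====
-- For B < 0 with len(A) + B ≥ 1, A's slice A[i:i+B] hits Python's negative-bound wraparound and
-- A returns a positive sum over spurious "windows"; B returns 0, the intended sum over the zero
-- existing windows of size B < 0.
def D_solve (A : List Int) (B : Int) : Prop := B < 0 ∧ 1 ≤ (A.length : Int) + B
instance (A : List Int) (B : Int) : Decidable (D_solve A B) := by unfold D_solve; infer_instance

def Spec_solve (A : List Int) (B : Int) (out : Int) : Prop := ¬ D_solve A B → out = solve_alt A B
instance (A : List Int) (B : Int) (out : Int) : Decidable (Spec_solve A B out) := by unfold Spec_solve; infer_instance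

def pvDiffWitness_solve : List Int × Int := ([1, 1], -1)
def pvDiffWitnessOut_solve : Int × Int := (1, 0)

-- ===== CLAIM (what is proved, stated in full; the proofs are below) =====
def Claim_unchanged_solve : Prop := ∀ (A : List Int) (B : Int), Dom_solve A B → Spec_solve A B (solve A B)
def Claim_changed_solve : Prop := Dom_solve (pvDiffWitness_solve.1) (pvDiffWitness_solve.2) ∧ D_solve (pvDiffWitness_solve.1) (pvDiffWitness_solve.2) ∧ solve (pvDiffWitness_solve.1) (pvDiffWitness_solve.2) = pvDiffWitnessOut_solve.1 ∧ solve_alt (pvDiffWitness_solve.1) (pvDiffWitness_solve.2) = pvDiffWitnessOut_solve.2 ∧ pvDiffWitnessOut_solve.1 ≠ pvDiffWitnessOut_solve.2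
def Claim_exact_solve : Prop := ∀ (A : List Int) (B : Int), Dom_solve A B → D_solve A B → solve A B ≠ solve_alt A B

-- ===== LEMMAS AND PROOFS =====

-- len(set(l)) is the number of distinct elements of l
theorem lenOfList (l : List Int) :
    PySem.Set.len (PySem.Set.ofList l) = (l.toFinset.card : Int) := by
  have h1 : (PySem.Set.ofList l).toFinset = l.toFinset := by
    ext a; simp [List.mem_toFinset, PySem.Set.mem_ofList]
  simp only [PySem.Set.len]
  rw [← h1, List.toFinset_card_of_nodup (PySem.Set.nodup_ofList _)]


-- the number of distinct values of each k-window, as a function of the start index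
def winCard (A : List Int) (b i : Nat) : Int := (((A.drop i).take b).toFinset.card : Int)

-- A's fold is the sum of the per-window distinct counts
theorem solve_eq_sum (A : List Int) (b : Nat) (_hb : 1 ≤ b) (hbn : b ≤ A.length) :
    solve A (b : Int) = ((List.range (A.length + 1 - b)).map (winCard A b)).sum := by
  show (PySem.List.pyRange 0 ((A.length : Int) - b + 1) 1).foldl
      (fun sum_of i => sum_of + PySem.Set.len (PySem.Set.ofList (PySem.List.slice A (some i) (some (i + (b : Int)))))) 0
    = _
  rw [PySem.List.foldl_add]
  rw [PySem.List.pyRange_one, List.map_map]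
  have hm : (((A.length : Int) - b + 1) - 0).toNat = A.length + 1 - b := by omega
  rw [hm, zero_add]
  congr 1
  apply List.map_congr_left
  intro k hk
  simp only [Function.comp_apply, zero_add]
  rw [PySem.List.slice_natCast_add, lenOfList]
  rfl

theorem solve_trivial (A : List Int) (B : Int)
    (h : (B ≤ 0 ∧ ((A.length : Int) + B ≤ 0 ∨ B = 0)) ∨ (A.length : Int) < B) :
    solve A B = 0 := by
  show (PySem.List.pyRange 0 ((A.length : Int) - B + 1) 1).foldl
      (fun sum_of i => sum_of + PySem.Set.len (PySem.Set.ofList (PySem.List.slice A (some i) (some (i + B))))) 0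
    = 0
  rcases h with ⟨hB, hc⟩ | hn
  · rw [PySem.List.foldl_add, zero_add]
    apply List.sum_eq_zero
    intro t ht
    obtain ⟨i, hi, rfl⟩ := List.mem_map.mp ht
    have hi' := PySem.List.mem_pyRange_one.mp hi
    have hlen : (PySem.List.slice A (some i) (some (i + B))).length = 0 := by
      rw [PySem.List.length_slice]
      simp only [PySem.List.clampIdx]
      split_ifs <;> omega
    rw [List.length_eq_zero_iff.mp hlen]
    simp [PySem.Set.len, PySem.Set.ofList]
  · rw [PySem.List.pyRange_one_eq_nil (by omega)]
    rfl

theorem solve_pos_of_D (A : List Int) (B : Int) (hB : B < 0) (hn : 1 ≤ (A.length : Int) + B) :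
    1 ≤ solve A B := by
  show 1 ≤ (PySem.List.pyRange 0 ((A.length : Int) - B + 1) 1).foldl
      (fun sum_of i => sum_of + PySem.Set.len (PySem.Set.ofList (PySem.List.slice A (some i) (some (i + B))))) 0
  rw [PySem.List.pyRange_one_cons (by omega), List.foldl_cons, PySem.List.foldl_add]
  have hfirst : 1 ≤ PySem.Set.len (PySem.Set.ofList (PySem.List.slice A (some 0) (some (0 + B)))) := by
    rw [zero_add]
    have hk : B = -(((-B).toNat : Nat) : Int) := by omega
    rw [hk]
    rw [show (some (-(((-B).toNat : Nat) : Int)) : Option Int) = some (-(((-B).toNat : Nat) : Int)) from rfl]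
    rw [show PySem.List.slice A (some 0) (some (-(((-B).toNat : Nat) : Int)))
        = PySem.List.slice A none (some (-(((-B).toNat : Nat) : Int))) by simp]
    rw [PySem.List.slice_to_neg_natCast A _ (by omega)]
    rw [lenOfList]
    have : (List.take (A.length - (-B).toNat) A) ≠ [] := by
      apply List.ne_nil_of_length_pos
      rw [List.length_take]
      omega
    obtain ⟨a, ha⟩ := List.exists_mem_of_ne_nil _ this
    have := Finset.card_pos.mpr ⟨a, List.mem_toFinset.mpr ha⟩
    omega
  have hrest : 0 ≤ ((PySem.List.pyRange (0+1) ((A.length : Int) - B + 1) 1).map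
      (fun i => PySem.Set.len (PySem.Set.ofList (PySem.List.slice A (some i) (some (i + B)))))).sum := by
    apply List.sum_nonneg
    intro t ht
    obtain ⟨i, _, rfl⟩ := List.mem_map.mp ht
    simp [PySem.Set.len]
  omega


theorem distinct_add (w : List Int) (x : Int) (c distinct : Int)
    (hc : c = ((w.count x : Nat) : Int)) (hd : distinct = ((w.toFinset.card : Nat) : Int)) :
    (if c = 0 then distinct + 1 else distinct) = (((w ++ [x]).toFinset.card : Nat) : Int) := by
  by_cases hx : x ∈ w
  · rw [if_neg (by rw [hc]; simp [List.count_eq_zero]; exact hx), hd]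
    congr 2
    simp [List.toFinset_append, Finset.insert_eq_self.mpr (List.mem_toFinset.mpr hx)]
  · rw [if_pos (by rw [hc]; simp [List.count_eq_zero, hx]), hd]
    have h5 : ((w ++ [x]).toFinset) = insert x w.toFinset := by
      simp [List.toFinset_append, Finset.union_comm]
    rw [h5, Finset.card_insert_of_notMem (by simp [hx])]
    push_cast; ring

theorem distinct_update (w' : List Int) (y : Int) (cy d1 : Int)
    (hcy : cy = ((w'.count y : Nat) : Int)) (hd1 : d1 = (((y :: w').toFinset.card : Nat) : Int)) :
    (if cy = 0 then d1 - 1 else d1) = ((w'.toFinset.card : Nat) : Int) := by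
  by_cases hy : y ∈ w'
  · rw [if_neg (by rw [hcy]; simp [List.count_eq_zero]; exact hy), hd1]
    congr 2
    simp [List.toFinset_cons, Finset.insert_eq_self.mpr (List.mem_toFinset.mpr hy)]
  · rw [if_pos (by rw [hcy]; simp [List.count_eq_zero, hy]), hd1]
    rw [List.toFinset_cons, Finset.card_insert_of_notMem (by simp [hy])]
    push_cast; ring

theorem count_cons_ite (y : Int) (t : List Int) (z : Int) :
    (y :: t).count z = t.count z + (if z = y then 1 else 0) := by
  rw [List.count_cons]
  by_cases h : z = y
  · simp [h]
  · simp [h, Ne.symm h]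

theorem count_app_singleton (w : List Int) (z x : Int) :
    (w ++ [x]).count z = w.count z + (if z = x then 1 else 0) := by
  rw [List.count_append]
  by_cases h : z = x
  · simp [h]
  · simp [h, Ne.symm h]

theorem alt_loop_inv (b : Nat) (hb : 1 ≤ b) (A : List Int) :
    ∀ (rest pre : List Int) (cnt : PySem.Dict Int Int) (distinct total : Int),
      A = pre ++ rest →
      (∀ z, cnt.getD z 0 = ((pre.drop (pre.length - b)).count z : Int)) →
      distinct = ((pre.drop (pre.length - b)).toFinset.card : Int) →
      total = ((List.range (pre.length + 1 - b)).map (winCard A b)).sum →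
      ((PySem.List.enumerate rest (pre.length : Int)).foldl (solveAltStep A (b : Int))
          (cnt, distinct, total)).2.2
        = ((List.range (A.length + 1 - b)).map (winCard A b)).sum := by
  intro rest
  induction rest with
  | nil =>
    intro pre cnt distinct total hA h1 h2 h3
    rw [PySem.List.enumerate_nil]
    simp only [List.foldl_nil]
    rw [h3, hA]
    simp
  | cons x rs IH =>
    intro pre cnt distinct total hA h1 h2 h3
    have hA' : A = (pre ++ [x]) ++ rs := by rw [hA]; simp
    have hAlen : A.length = pre.length + 1 + rs.length := by rw [hA]; simp; omega
    rw [PySem.List.enumerate_cons, List.foldl_cons,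
      show ((pre.length : Int) + 1) = (((pre ++ [x]).length : Int)) by simp]
    -- the new window after consuming x
    have htake : A.take (pre.length + 1) = pre ++ [x] := by
      rw [hA, List.take_append]
      simp
    have hwin : b ≤ pre.length + 1 →
        (pre ++ [x]).drop (pre.length + 1 - b) = (A.drop (pre.length + 1 - b)).take b := by
      intro hble
      rw [← htake, List.drop_take]
      congr 1
      omega
    -- the total component: common to both branches below
    have htotal : ∀ d2 : Int,
        d2 = ((((pre ++ [x]).drop (pre.length + 1 - b)).toFinset.card : Nat) : Int) →
        (if (b : Int) - 1 ≤ (pre.length : Int) then total + d2 else total)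
          = ((List.range (pre.length + 1 + 1 - b)).map (winCard A b)).sum := by
      intro d2 hd2
      by_cases hbk : b ≤ pre.length + 1
      · rw [if_pos (by omega), show pre.length + 1 + 1 - b = (pre.length + 1 - b) + 1 by omega,
          List.range_succ, List.map_append, List.sum_append, h3]
        simp only [List.map_cons, List.map_nil, List.sum_cons, List.sum_nil]
        rw [hd2, hwin hbk]
        unfold winCard
        ring
      · rw [if_neg (by omega), h3,
          show pre.length + 1 + 1 - b = pre.length + 1 - b by omega]
    by_cases hk : b ≤ pre.length
    · -- removal branch taken
      have hkx : ((b : Int) ≤ (pre.length : Int)) := by exact_mod_cast hk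
      have hkb_lt : pre.length - b < pre.length := by omega
      have hgety : PySem.List.pyGet? A ((pre.length : Int) - (b : Int)) = some pre[pre.length - b] := by
        rw [show ((pre.length : Int) - (b : Int)) = ((pre.length - b : Nat) : Int) by omega,
          PySem.List.pyGet?_natCast, hA, List.getElem?_append_left hkb_lt,
          List.getElem?_eq_getElem hkb_lt]
      have hw : pre.drop (pre.length - b) = pre[pre.length - b] :: pre.drop (pre.length - b + 1) :=
        List.drop_eq_getElem_cons hkb_lt
      have hu : (pre ++ [x]).drop (pre.length + 1 - b)
          = pre.drop (pre.length - b + 1) ++ [x] := by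
        rw [List.drop_append_of_le_length (by omega)]
        congr 2
        omega
      have hstep : solveAltStep A (b : Int) (cnt, distinct, total) ((pre.length : Int), x)
          = ((cnt.insert x (cnt.getD x 0 + 1)).insert pre[pre.length - b]
               ((cnt.insert x (cnt.getD x 0 + 1)).getD pre[pre.length - b] 0 - 1),
             (if (cnt.insert x (cnt.getD x 0 + 1)).getD pre[pre.length - b] 0 - 1 = 0
                then (if cnt.getD x 0 = 0 then distinct + 1 else distinct) - 1
                else (if cnt.getD x 0 = 0 then distinct + 1 else distinct)),
             (if (b : Int) - 1 ≤ (pre.length : Int) then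
                total + (if (cnt.insert x (cnt.getD x 0 + 1)).getD pre[pre.length - b] 0 - 1 = 0
                  then (if cnt.getD x 0 = 0 then distinct + 1 else distinct) - 1
                  else (if cnt.getD x 0 = 0 then distinct + 1 else distinct))
                else total)) := by
        simp only [solveAltStep, hgety, Option.getD_some, if_pos hkx]
      have hcy : (cnt.insert x (cnt.getD x 0 + 1)).getD pre[pre.length - b] 0 - 1
          = (((pre.drop (pre.length - b + 1) ++ [x]).count pre[pre.length - b] : Nat) : Int) := by
        rw [PySem.Dict.getD_insert]
        by_cases hyx : pre[pre.length - b] = x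
        · rw [if_pos hyx, h1, hw, hyx, count_cons_ite, count_app_singleton]
          split_ifs <;> omega
        · rw [if_neg hyx, h1, hw, count_cons_ite, count_app_singleton]
          split_ifs <;> omega
      have hd1 : (if cnt.getD x 0 = 0 then distinct + 1 else distinct)
          = (((pre.drop (pre.length - b) ++ [x]).toFinset.card : Nat) : Int) :=
        distinct_add _ x _ _ (by rw [h1]) h2
      have hd2 : (if (cnt.insert x (cnt.getD x 0 + 1)).getD pre[pre.length - b] 0 - 1 = 0
            then (if cnt.getD x 0 = 0 then distinct + 1 else distinct) - 1
            else (if cnt.getD x 0 = 0 then distinct + 1 else distinct))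
          = ((((pre ++ [x]).drop (pre.length + 1 - b)).toFinset.card : Nat) : Int) := by
        rw [hu]
        refine distinct_update _ _ _ _ hcy ?_
        rw [hd1, hw, List.cons_append]
      rw [hstep]
      refine IH (pre ++ [x]) _ _ _ hA' ?_ ?_ ?_
      · intro z
        rw [show (pre ++ [x]).length - b = pre.length + 1 - b by simp, hu,
          PySem.Dict.getD_insert]
        by_cases hzy : z = pre[pre.length - b]
        · rw [if_pos hzy, hzy]
          exact hcy
        · rw [if_neg hzy, PySem.Dict.getD_insert]
          by_cases hzx : z = x
          · rw [if_pos hzx, h1, hw, count_cons_ite, count_app_singleton, hzx]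
            split_ifs <;> omega
          · rw [if_neg hzx, h1, hw, count_cons_ite, count_app_singleton]
            split_ifs <;> omega
      · rw [show (pre ++ [x]).length - b = pre.length + 1 - b by simp]
        exact hd2
      · rw [show (pre ++ [x]).length + 1 - b = pre.length + 1 + 1 - b by simp]
        exact htotal _ hd2
    · -- no removal: the window only grows
      have hkx : ¬ ((b : Int) ≤ (pre.length : Int)) := by exact_mod_cast hk
      have hw0 : pre.length - b = 0 := by omega
      have hu0 : pre.length + 1 - b = 0 := by omega
      have hstep : solveAltStep A (b : Int) (cnt, distinct, total) ((pre.length : Int), x)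
          = (cnt.insert x (cnt.getD x 0 + 1),
             (if cnt.getD x 0 = 0 then distinct + 1 else distinct),
             (if (b : Int) - 1 ≤ (pre.length : Int)
                then total + (if cnt.getD x 0 = 0 then distinct + 1 else distinct)
                else total)) := by
        simp only [solveAltStep, if_neg hkx]
      have hd2 : (if cnt.getD x 0 = 0 then distinct + 1 else distinct)
          = ((((pre ++ [x]).drop (pre.length + 1 - b)).toFinset.card : Nat) : Int) := by
        rw [hu0, List.drop_zero]
        exact distinct_add pre x _ _ (by rw [h1, hw0, List.drop_zero]) (by rw [h2, hw0, List.drop_zero])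
      rw [hstep]
      refine IH (pre ++ [x]) _ _ _ hA' ?_ ?_ ?_
      · intro z
        rw [show (pre ++ [x]).length - b = pre.length + 1 - b by simp, hu0, List.drop_zero,
          PySem.Dict.getD_insert]
        by_cases hzx : z = x
        · rw [if_pos hzx, h1, hw0, List.drop_zero, count_app_singleton, hzx]
          split_ifs <;> omega
        · rw [if_neg hzx, h1, hw0, List.drop_zero, count_app_singleton]
          split_ifs <;> omega
      · rw [show (pre ++ [x]).length - b = pre.length + 1 - b by simp]
        exact hd2
      · rw [show (pre ++ [x]).length + 1 - b = pre.length + 1 + 1 - b by simp]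
        exact htotal _ hd2

-- ===== VERDICT (by name: the statement is the Claim_ definition above) =====
theorem solve_spec : Claim_unchanged_solve := by
  intro A B _ hD
  unfold D_solve at hD
  push Not at hD
  by_cases hB : B ≤ 0 ∨ (A.length : Int) < B
  · have hz : solve A B = 0 := by
      rcases hB with hB | hB
      · rcases lt_or_eq_of_le hB with hlt | heq
        · exact solve_trivial A B (Or.inl ⟨hB, Or.inl (by have := hD hlt; omega)⟩)
        · exact solve_trivial A B (Or.inl ⟨hB, Or.inr heq⟩)
      · exact solve_trivial A B (Or.inr hB)
    have ha : solve_alt A B = 0 := by unfold solve_alt; simp [hB]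
    rw [hz, ha]
  · push Not at hB
    obtain ⟨hB0, hBn⟩ := hB
    set b : Nat := B.toNat with hbdef
    have hBb : B = (b : Int) := by omega
    have hb1 : 1 ≤ b := by omega
    have hbn : b ≤ A.length := by omega
    have halt : solve_alt A B = ((List.range (A.length + 1 - b)).map (winCard A b)).sum := by
      unfold solve_alt
      rw [if_neg (by omega)]
      rw [hBb]
      have := alt_loop_inv b hb1 A A [] PySem.Dict.empty 0 0 (by simp)
        (by intro z; simp [PySem.Dict.getD_empty]) (by simp) (by simp [Nat.sub_eq_zero_of_le hb1])
      simpa using this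
    rw [hBb] at halt
    rw [hBb, solve_eq_sum A b hb1 hbn, halt]

theorem solve_changed : Claim_changed_solve := by
  unfold Claim_changed_solve; decide

theorem solve_tight : Claim_exact_solve := by
  intro A B _ hD
  obtain ⟨hBneg, hn⟩ := hD
  have h1 := solve_pos_of_D A B hBneg hn
  have h2 : solve_alt A B = 0 := by
    unfold solve_alt
    simp [le_of_lt hBneg]
  omega
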